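-- pv_equiv track=rewrite | github.com/f4pga/prjxray | experiments/timfuz/timfuz.py | shared_const
-- ===== SOURCE A (Python) =====
-- def shared_const(row_ref, row_cmp):
--     '''Return true if more constants are equal than not equal'''
--     #return False
--     matches = 0
--     unmatches = 0
--     ks = list(row_ref.keys()) + list(row_cmp.keys())
--     for k in ks:
--         vr = row_ref.get(k, None)
--         vc = row_cmp.get(k, None)
--         # At least one
--         if vr is not None and vc is not None:
--             if vc == vr:
--                 matches += 1
--             else:
--                 unmatches += 1
--         else:
--             unmatches += 1
--
--     # Will equation reduce if subtracted?
--     return matches > unmatches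
-- ===== SOURCE B (Python) =====
-- def shared_const(row_ref, row_cmp):
--     '''Return true if more constants are equal than not equal'''
--     matches = 2 * sum(1 for k, v in row_ref.items() if row_cmp.get(k) == v)
--     total = len(row_ref) + len(row_cmp)
--     return matches > total - matches
-- ===== Notes on version B (the rewrite author's own statement) =====
-- stated objective: simpler
-- what changed: A keeps two counters while looping over the concatenation of both key lists; B makes a single count over row_ref's entries (each shared equal key counts twice) and derives the unmatch count by subtraction from the total key count.
import Mathlib
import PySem

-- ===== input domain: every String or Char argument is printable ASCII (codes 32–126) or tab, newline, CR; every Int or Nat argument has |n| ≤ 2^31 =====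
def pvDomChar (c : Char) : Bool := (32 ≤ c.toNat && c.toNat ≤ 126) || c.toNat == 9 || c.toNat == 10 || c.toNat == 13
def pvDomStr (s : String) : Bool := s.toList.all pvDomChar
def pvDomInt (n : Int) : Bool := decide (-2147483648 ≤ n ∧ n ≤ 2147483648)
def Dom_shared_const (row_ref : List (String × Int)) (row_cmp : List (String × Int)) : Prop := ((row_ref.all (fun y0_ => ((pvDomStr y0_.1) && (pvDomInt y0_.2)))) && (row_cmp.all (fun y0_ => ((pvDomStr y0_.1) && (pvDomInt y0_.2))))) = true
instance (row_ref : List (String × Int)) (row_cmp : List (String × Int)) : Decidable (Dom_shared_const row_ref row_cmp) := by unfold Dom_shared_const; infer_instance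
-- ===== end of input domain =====

-- B replaces A's two-counter loop over both key lists by a single count over row_ref's
-- entries (each shared equal key counts twice) and derives the unmatch count by
-- subtraction from the total key count; objective: simpler.

-- dict.get(k, None) on an association list: first matching key wins
def pvDictGet (d : List (String × Int)) (k : String) : Option Int :=
  match d with
  | [] => none
  | (k', v) :: rest => if k' = k then some v else pvDictGet rest k

-- ===== PORT A =====
def shared_const (row_ref : List (String × Int)) (row_cmp : List (String × Int)) : Bool :=
  -- ks = list(row_ref.keys()) + list(row_cmp.keys())
  let ks : List String := row_ref.map Prod.fst ++ row_cmp.map Prod.fst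
  -- the loop carries (matches, unmatches), starting from (0, 0)
  let mu : Int × Int := ks.foldl (fun (mu : Int × Int) k =>
      match pvDictGet row_ref k, pvDictGet row_cmp k with
      | some vr, some vc => if vc = vr then (mu.1 + 1, mu.2) else (mu.1, mu.2 + 1)
      | _, _ => (mu.1, mu.2 + 1)) (0, 0)
  decide (mu.1 > mu.2)

-- ===== PORT B =====
def shared_const_alt (row_ref : List (String × Int)) (row_cmp : List (String × Int)) : Bool :=
  -- matches = 2 * sum(1 for k, v in row_ref.items() if row_cmp.get(k) == v)
  let mtch : Int :=
    2 * ((row_ref.countP (fun kv => decide (pvDictGet row_cmp kv.1 = some kv.2)) : Nat) : Int)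
  let total : Int := (row_ref.length : Int) + (row_cmp.length : Int)
  decide (mtch > total - mtch)

-- ===== PRECONDITION & SPEC =====
-- Pre_ excludes association lists with duplicate keys: those do not represent a Python
-- dict (dict construction collapses duplicates), so any behaviour on them is a
-- representation artefact, not a behaviour of the Python programs.
def Pre_shared_const (row_ref : List (String × Int)) (row_cmp : List (String × Int)) : Prop :=
  (row_ref.map Prod.fst).Nodup ∧ (row_cmp.map Prod.fst).Nodup
instance (row_ref : List (String × Int)) (row_cmp : List (String × Int)) : Decidable (Pre_shared_const row_ref row_cmp) := by unfold Pre_shared_const; infer_instance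

def pvWitness_shared_const : (List (String × Int)) × (List (String × Int)) :=
  ([("a", 1), ("b", 2)], [("a", 1)])

def Spec_shared_const (row_ref : List (String × Int)) (row_cmp : List (String × Int)) (out : Bool) : Prop := out = shared_const_alt row_ref row_cmp
instance (row_ref : List (String × Int)) (row_cmp : List (String × Int)) (out : Bool) : Decidable (Spec_shared_const row_ref row_cmp out) := by unfold Spec_shared_const; infer_instance

-- ===== CLAIM (what is proved, stated in full; the proofs are below) =====
def Claim_equal_shared_const : Prop := ∀ (row_ref : List (String × Int)) (row_cmp : List (String × Int)), Dom_shared_const row_ref row_cmp → Pre_shared_const row_ref row_cmp → Spec_shared_const row_ref row_cmp (shared_const row_ref row_cmp)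

-- ===== LEMMAS AND PROOFS =====

-- the per-key test A's loop body performs
def pvQ (row_ref row_cmp : List (String × Int)) (k : String) : Bool :=
  match pvDictGet row_ref k, pvDictGet row_cmp k with
  | some vr, some vc => decide (vc = vr)
  | _, _ => false

theorem pvDictGet_nodup {d : List (String × Int)} {k : String} {v : Int}
    (hnd : (d.map Prod.fst).Nodup) (hm : (k, v) ∈ d) : pvDictGet d k = some v := by
  induction d with
  | nil => simp at hm
  | cons p rest ih =>
    rw [List.map_cons, List.nodup_cons] at hnd
    rcases List.mem_cons.mp hm with hm | hm
    · subst hm; simp [pvDictGet]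
    · have hk : p.1 ≠ k := by
        intro hkk
        exact hnd.1 (by rw [hkk]; exact List.mem_map_of_mem hm)
      simp only [pvDictGet, hk, if_false]
      exact ih hnd.2 hm

-- A's fold computes (matches, unmatches) = (count of pvQ, count of ¬pvQ) over ks
theorem foldA_eq (row_ref row_cmp : List (String × Int)) (ks : List String) :
    ∀ (m u : Int),
      ks.foldl (fun (mu : Int × Int) k =>
        match pvDictGet row_ref k, pvDictGet row_cmp k with
        | some vr, some vc => if vc = vr then (mu.1 + 1, mu.2) else (mu.1, mu.2 + 1)
        | _, _ => (mu.1, mu.2 + 1)) (m, u)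
      = (m + (ks.countP (pvQ row_ref row_cmp) : Nat),
         u + (ks.countP (fun k => !(pvQ row_ref row_cmp k)) : Nat)) := by
  induction ks with
  | nil => intro m u; simp
  | cons k rest ih =>
    intro m u
    have hstep : (match pvDictGet row_ref k, pvDictGet row_cmp k with
        | some vr, some vc => if vc = vr then ((m : Int) + 1, u) else (m, u + 1)
        | _, _ => (m, u + 1))
        = (if pvQ row_ref row_cmp k then (m + 1, u) else (m, u + 1)) := by
      unfold pvQ
      rcases pvDictGet row_ref k with _ | vr <;> rcases pvDictGet row_cmp k with _ | vc
      · rfl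
      · rfl
      · rfl
      · by_cases h : vc = vr <;> simp [h]
    rw [List.foldl_cons, hstep]
    by_cases hq : pvQ row_ref row_cmp k = true
    · rw [if_pos hq, ih, List.countP_cons, List.countP_cons]
      simp only [hq, if_true, Bool.not_true, Prod.mk.injEq]
      constructor <;> push_cast <;> ring
    · rw [if_neg hq, ih, List.countP_cons, List.countP_cons]
      simp only [hq, Bool.not_eq_true, Prod.mk.injEq] at *
      simp only [hq, if_false, if_true, Bool.not_false]
      constructor <;> push_cast <;> ring

theorem pvDictGet_isSome_mem {d : List (String × Int)} {k : String}
    (h : (pvDictGet d k).isSome) : k ∈ d.map Prod.fst := by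
  induction d with
  | nil => simp [pvDictGet] at h
  | cons p rest ih =>
    by_cases hk : p.1 = k
    · simp [hk]
    · simp only [pvDictGet, hk, if_false] at h
      simp [ih h]

theorem pvQ_isSome {row_ref row_cmp : List (String × Int)} {k : String}
    (h : pvQ row_ref row_cmp k = true) :
    (pvDictGet row_ref k).isSome ∧ (pvDictGet row_cmp k).isSome := by
  unfold pvQ at h
  rcases h1 : pvDictGet row_ref k with _ | vr <;> rcases h2 : pvDictGet row_cmp k with _ | vc <;>
    simp [h1, h2] at h ⊢

-- with nodup keys on both sides the two key lists carry the same pvQ-count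
theorem count_sides_eq (row_ref row_cmp : List (String × Int))
    (h1 : (row_ref.map Prod.fst).Nodup) (h2 : (row_cmp.map Prod.fst).Nodup) :
    (row_ref.map Prod.fst).countP (pvQ row_ref row_cmp)
      = (row_cmp.map Prod.fst).countP (pvQ row_ref row_cmp) := by
  rw [List.countP_eq_length_filter, List.countP_eq_length_filter]
  apply List.Perm.length_eq
  rw [List.perm_ext_iff_of_nodup (h1.filter _) (h2.filter _)]
  intro a
  simp only [List.mem_filter]
  constructor
  · rintro ⟨-, hq⟩
    exact ⟨pvDictGet_isSome_mem (pvQ_isSome hq).2, hq⟩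
  · rintro ⟨-, hq⟩
    exact ⟨pvDictGet_isSome_mem (pvQ_isSome hq).1, hq⟩

-- B's count over row_ref's entries is the count of pvQ over row_ref's keys
theorem countB_eq (row_ref row_cmp : List (String × Int))
    (hnd : (row_ref.map Prod.fst).Nodup) :
    row_ref.countP (fun kv => decide (pvDictGet row_cmp kv.1 = some kv.2))
      = (row_ref.map Prod.fst).countP (pvQ row_ref row_cmp) := by
  rw [List.countP_map]
  apply List.countP_congr
  intro kv hkv
  have hr : pvDictGet row_ref kv.1 = some kv.2 :=
    pvDictGet_nodup hnd (by rcases kv with ⟨a, b⟩; exact hkv)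
  simp only [Function.comp]
  unfold pvQ
  rw [hr]
  rcases h : pvDictGet row_cmp kv.1 with _ | vc <;> simp [eq_comm]

-- ===== VERDICT (by name: the statement is the Claim_ definition above) =====
theorem shared_const_spec : Claim_equal_shared_const := by
  intro row_ref row_cmp _ hpre
  obtain ⟨h1, h2⟩ := hpre
  show shared_const row_ref row_cmp = shared_const_alt row_ref row_cmp
  simp only [shared_const, shared_const_alt]
  rw [foldA_eq row_ref row_cmp, countB_eq row_ref row_cmp h1]
  have hcnt : (row_ref.map Prod.fst ++ row_cmp.map Prod.fst).countP (pvQ row_ref row_cmp)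
      = 2 * (row_ref.map Prod.fst).countP (pvQ row_ref row_cmp) := by
    rw [List.countP_append, ← count_sides_eq row_ref row_cmp h1 h2]
    ring
  have hlen : (row_ref.map Prod.fst ++ row_cmp.map Prod.fst).countP (pvQ row_ref row_cmp)
        + (row_ref.map Prod.fst ++ row_cmp.map Prod.fst).countP
            (fun k => !(pvQ row_ref row_cmp k))
      = row_ref.length + row_cmp.length := by
    rw [show (fun k => !pvQ row_ref row_cmp k)
          = (fun a => decide ¬ (pvQ row_ref row_cmp a = true)) by
        funext a; cases pvQ row_ref row_cmp a <;> simp,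
      ← List.length_eq_countP_add_countP]
    simp
  simp only [zero_add, decide_eq_decide]
  omega
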